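-- pv_equiv track=rewrite | github.com/Migas77/AA-108287 | A4/coin_problem.py | coin_problem_with_heuristic
-- ===== SOURCE A (Python) =====
-- def coin_problem_with_heuristic(coins):
--   amount = 0
--
--   while len(coins) > 0:
--     i = coins.index(max(coins))
--     amount += coins[i]
--     start = max(0, i - 1)
--     end = min(len(coins), i + 2)
--     del coins[start:end]
--   return amount
-- ===== SOURCE B (Python) =====
-- def coin_problem_with_heuristic(coins):
--     # Sort indices once by (value desc, index asc); sweep with a doubly-linked
--     # list over alive positions and lazy deletion.  Return value only: does not
--     # empty `coins` in place as A does.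
--     n = len(coins)
--     order = sorted(range(n), key=lambda j: (-coins[j], j))
--     prev = list(range(-1, n - 1))
--     nxt = list(range(1, n + 1))
--     alive = [True] * n
--     amount = 0
--     for i in order:
--         if not alive[i]:
--             continue
--         amount += coins[i]
--         p = prev[i]
--         q = nxt[i]
--         if p >= 0:
--             alive[p] = False
--             p = prev[p]
--         if q < n:
--             alive[q] = False
--             q = nxt[q]
--         if p >= 0:
--             nxt[p] = q
--         if q < n:
--             prev[q] = p
--         alive[i] = False
--     return amount
-- ===== Notes on version B (the rewrite author's own statement) =====
-- stated objective: faster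
-- what changed: A rescans the shrinking list for its maximum and deletes a slice each round (quadratic); B sorts the indices once by (value desc, index asc) and sweeps them over a doubly-linked list of alive positions with lazy deletion, and B does not mutate the input list.
import Mathlib
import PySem

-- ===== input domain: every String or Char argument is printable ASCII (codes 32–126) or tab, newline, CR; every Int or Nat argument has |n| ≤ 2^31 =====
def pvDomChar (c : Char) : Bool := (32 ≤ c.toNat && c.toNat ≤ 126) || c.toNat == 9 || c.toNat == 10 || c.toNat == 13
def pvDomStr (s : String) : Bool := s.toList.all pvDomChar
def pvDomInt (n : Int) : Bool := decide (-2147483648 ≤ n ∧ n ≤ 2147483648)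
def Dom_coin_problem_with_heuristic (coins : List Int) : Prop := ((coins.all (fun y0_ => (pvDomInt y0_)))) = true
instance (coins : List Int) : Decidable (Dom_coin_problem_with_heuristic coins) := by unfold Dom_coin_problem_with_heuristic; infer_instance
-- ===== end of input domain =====

-- B replaces A's quadratic rescan-and-delete loop by one sort of the indices plus a linear
-- doubly-linked-list sweep with lazy deletion (A empties `coins` in place, B only reads it;
-- the equivalence proved here is about the return value).

-- ===== PORT A =====
-- while len(coins) > 0: i = coins.index(max(coins)); amount += coins[i]; del coins[max(0,i-1):min(len,i+2)]
-- (each round deletes at least one element, so `coins.length` rounds of fuel make the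
--  while-loop structural; the fuel is never exhausted)
def coin_problem_with_heuristic_go (fuel : Nat) (coins : List Int) (amount : Int) : Int :=
  match fuel with
  | 0 => amount
  | fuel + 1 =>
    if 0 < coins.length then
      match PySem.List.max? coins (fun x => x) with
      | none => amount                       -- unreachable: coins ≠ []
      | some m =>
        match PySem.List.index? coins m with
        | none => amount                     -- unreachable: m ∈ coins
        | some i =>
          coin_problem_with_heuristic_go fuel
            (PySem.List.slice coins none (some (max 0 ((i : Int) - 1))) ++
             PySem.List.slice coins (some (min (PySem.List.len coins) ((i : Int) + 2))) none)
            (amount + PySem.List.pyGetD coins (i : Int) 0)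
    else amount

def coin_problem_with_heuristic (coins : List Int) : Int :=
  coin_problem_with_heuristic_go coins.length coins 0

-- ===== PORT B =====
-- the body of B's for-loop (state = (amount, prev, nxt, alive))
def pvBStep (coins : List Int) (n : Int) (s : Int × List Int × List Int × List Bool) (i : Int) :
    Int × List Int × List Int × List Bool :=
  let (amount, prev, nxt, alive) := s
  if !(PySem.List.pyGetD alive i false) then s        -- if not alive[i]: continue
  else
    let amount := amount + PySem.List.pyGetD coins i 0
    let p := PySem.List.pyGetD prev i 0
    let q := PySem.List.pyGetD nxt i 0
    let (alive, p) := if 0 ≤ p then (PySem.List.pySetD alive p false, PySem.List.pyGetD prev p 0) else (alive, p)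
    let (alive, q) := if q < n then (PySem.List.pySetD alive q false, PySem.List.pyGetD nxt q 0) else (alive, q)
    let nxt := if 0 ≤ p then PySem.List.pySetD nxt p q else nxt
    let prev := if q < n then PySem.List.pySetD prev q p else prev
    let alive := PySem.List.pySetD alive i false
    (amount, prev, nxt, alive)

def coin_problem_with_heuristic_alt (coins : List Int) : Int :=
  let n : Int := PySem.List.len coins
  let order := PySem.List.sorted2 (PySem.List.pyRange 0 n 1)
                 (fun j => -(PySem.List.pyGetD coins j 0)) (fun j => j)
  let prev := PySem.List.pyRange (-1) (n - 1) 1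
  let nxt := PySem.List.pyRange 1 (n + 1) 1
  let alive := List.replicate coins.length true
  (order.foldl (pvBStep coins n) (0, prev, nxt, alive)).1

-- ===== PRECONDITION & SPEC =====
def Spec_coin_problem_with_heuristic (coins : List Int) (out : Int) : Prop := out = coin_problem_with_heuristic_alt coins
instance (coins : List Int) (out : Int) : Decidable (Spec_coin_problem_with_heuristic coins out) := by unfold Spec_coin_problem_with_heuristic; infer_instance

-- ===== CLAIM (what is proved, stated in full; the proofs are below) =====
def Claim_equal_coin_problem_with_heuristic : Prop := ∀ (coins : List Int), Dom_coin_problem_with_heuristic coins → Spec_coin_problem_with_heuristic coins (coin_problem_with_heuristic coins)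

-- ===== LEMMAS AND PROOFS =====

-- `getD` after `set`
lemma pvGetD_set {α : Type} (l : List α) (m k : Nat) (v d : α) (hm : m < l.length) :
    (l.set m v).getD k d = if k = m then v else l.getD k d := by
  rw [List.getD_eq_getElem?_getD, List.getD_eq_getElem?_getD, List.getElem?_set]
  by_cases hkm : k = m
  · subst hkm; simp [hm]
  · have hmk : ¬ (m = k) := fun h => hkm h.symm
    simp [hmk, hkm]

-- Python `l[i]` (i ≥ 0) against Lean's `getD`
lemma pvGetD_int {α : Type} (l : List α) (a : Int) (d : α) (h0 : 0 ≤ a) :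
    PySem.List.pyGetD l a d = l.getD a.toNat d := by
  by_cases hlt : a.toNat < l.length
  · rw [PySem.List.pyGetD_eq_getElem l d h0 (by omega), List.getD_eq_getElem l d hlt]
  · rw [PySem.List.pyGetD_of_none, List.getD_eq_default]
    · omega
    · rw [PySem.List.pyGet?_eq_none_iff]
      simp [PySem.Raise.InRange]
      omega

-- the abstract greedy process both programs compute
def pvGreedy (L : List Int) : Int :=
  if 0 < L.length then
    match hm : PySem.List.max? L (fun x => x) with
    | none => 0
    | some m =>
      match hi : PySem.List.index? L m with
      | none => 0
      | some j => m + pvGreedy (L.take (j - 1) ++ L.drop (j + 2))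
  else 0
termination_by L.length
decreasing_by
  obtain ⟨hk, -, -⟩ := PySem.List.getElem_of_index?_eq_some hi
  simp
  omega

lemma pvGreedy_nil : pvGreedy [] = 0 := by
  rw [pvGreedy]
  simp

lemma pvGreedy_of (L : List Int) (h0 : 0 < L.length) (m : Int)
    (hm : PySem.List.max? L (fun x => x) = some m) (i : Nat)
    (hi : PySem.List.index? L m = some i) :
    pvGreedy L = m + pvGreedy (L.take (i - 1) ++ L.drop (i + 2)) := by
  rw [pvGreedy, if_pos h0]
  split
  · simp_all
  · rename_i m' hm'
    rw [hm] at hm'; cases hm'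
    split
    · simp_all
    · rename_i i' hi'
      rw [hi] at hi'; cases hi'
      rfl

lemma pvGo_nil (fuel : Nat) (amount : Int) :
    coin_problem_with_heuristic_go fuel [] amount = amount := by
  cases fuel <;> rw [coin_problem_with_heuristic_go] <;> simp

lemma pvGo_of (fuel : Nat) (L : List Int) (h0 : 0 < L.length) (m : Int)
    (hm : PySem.List.max? L (fun x => x) = some m) (i : Nat)
    (hi : PySem.List.index? L m = some i) (amount : Int) :
    coin_problem_with_heuristic_go (fuel + 1) L amount =
      coin_problem_with_heuristic_go fuel
        (PySem.List.slice L none (some (max 0 ((i : Int) - 1))) ++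
         PySem.List.slice L (some (min (PySem.List.len L) ((i : Int) + 2))) none)
        (amount + PySem.List.pyGetD L (i : Int) 0) := by
  rw [coin_problem_with_heuristic_go, if_pos h0]
  split
  · simp_all
  · rename_i m' hm'
    rw [hm] at hm'; cases hm'
    split
    · simp_all
    · rename_i i' hi'
      rw [hi] at hi'; cases hi'
      rfl

-- the slice A deletes is a take/drop pair
lemma pvSlice_eq (L : List Int) (i : Nat) (hk : i < L.length) :
    PySem.List.slice L none (some (max 0 ((i : Int) - 1))) ++
      PySem.List.slice L (some (min (PySem.List.len L) ((i : Int) + 2))) none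
    = L.take (i - 1) ++ L.drop (i + 2) := by
  rw [PySem.List.slice_to L (by omega),
      PySem.List.slice_from L (by simp [PySem.List.len_eq]; omega)]
  congr 1
  · congr 1; omega
  · by_cases hle : i + 2 ≤ L.length
    · congr 1; simp [PySem.List.len_eq]; omega
    · rw [List.drop_eq_nil_of_le, List.drop_eq_nil_of_le (by omega)]
      simp [PySem.List.len_eq]
      omega

-- A computes pvGreedy
lemma pvA_aux (N : Nat) : ∀ (coins : List Int) (amount : Int), coins.length ≤ N →
    coin_problem_with_heuristic_go N coins amount = amount + pvGreedy coins := by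
  induction N with
  | zero =>
    intro coins amount h
    have : coins = [] := by simpa using List.eq_nil_of_length_eq_zero (by omega)
    subst this
    rw [pvGo_nil, pvGreedy_nil]
    omega
  | succ N ih =>
    intro coins amount h
    rcases coins.eq_nil_or_concat with rfl | ⟨L', a, rfl⟩
    · rw [pvGo_nil, pvGreedy_nil]; omega
    · set L := L'.concat a with hL
      have h0 : 0 < L.length := by simp [hL]
      obtain ⟨m, hm⟩ : ∃ m, PySem.List.max? L (fun x => x) = some m := by
        rcases hmm : PySem.List.max? L (fun x => x) with _ | m
        · rw [PySem.List.max?_eq_none_iff] at hmm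
          exact absurd hmm (by simp [hL])
        · exact ⟨m, rfl⟩
      obtain ⟨i, hi⟩ : ∃ i, PySem.List.index? L m = some i := by
        have : m ∈ L := PySem.List.max?_mem hm
        rcases hii : PySem.List.index? L m with _ | i
        · rw [PySem.List.index?_eq_none_iff] at hii; exact absurd this hii
        · exact ⟨i, rfl⟩
      obtain ⟨hk, hgm, -⟩ := PySem.List.getElem_of_index?_eq_some hi
      rw [pvGo_of N L h0 m hm i hi amount, pvGreedy_of L h0 m hm i hi, pvSlice_eq L i hk]
      rw [ih _ _ (by simp; omega)]
      rw [PySem.List.pyGetD_eq_getElem L 0 (by omega) (by exact_mod_cast hk)]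
      simp only [Int.toNat_natCast]
      rw [hgm]
      ring

lemma pvA_eq_greedy (coins : List Int) : coin_problem_with_heuristic coins = pvGreedy coins := by
  have := pvA_aux coins.length coins 0 le_rfl
  simpa [coin_problem_with_heuristic] using this

-- greedy step at the (unique) first maximum
lemma pvGreedy_step (A B : List Int) (x : Int)
    (hmax : ∀ y ∈ A ++ x :: B, y ≤ x) (hA : ∀ y ∈ A, y ≠ x) :
    pvGreedy (A ++ x :: B) = x + pvGreedy (A.dropLast ++ B.tail) := by
  have h0 : 0 < (A ++ x :: B).length := by simp
  rcases hm : PySem.List.max? (A ++ x :: B) (fun y => y) with _ | m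
  · rw [PySem.List.max?_eq_none_iff] at hm; simp at hm
  · have hmx : m = x :=
      le_antisymm (hmax m (PySem.List.max?_mem hm))
        (PySem.List.max?_isMax hm x (by simp))
    subst hmx
    have hi : PySem.List.index? (A ++ m :: B) m = some A.length := by
      rw [PySem.List.index?_eq_some_iff]
      exact ⟨A, B, rfl, rfl, fun hxA => hA m hxA rfl⟩
    rw [pvGreedy_of _ h0 m hm _ hi]
    have h1 : List.take (A.length - 1) (A ++ m :: B) = A.dropLast := by
      rw [List.take_append_of_le_length (by omega), List.dropLast_eq_take]
    have h2 : List.drop (A.length + 2) (A ++ m :: B) = B.tail := by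
      rw [List.drop_append, List.drop_eq_nil_of_le (by omega)]
      have h3 : A.length + 2 - A.length = 2 := by omega
      rw [h3]
      simp [List.drop_succ_cons, List.drop_one]
    rw [h1, h2]

-- value at an index, B's sort order, the linked-list adjacency, and the sweep invariant
def pvKv (coins : List Int) (a : Int) : Int := PySem.List.pyGetD coins a 0

def pvLex (coins : List Int) (a b : Int) : Prop :=
  pvKv coins b < pvKv coins a ∨ (pvKv coins a = pvKv coins b ∧ a < b)

def pvAdj (prev nxt : List Int) (a b : Int) : Prop :=
  nxt.getD a.toNat 0 = b ∧ prev.getD b.toNat 0 = a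

def pvRepr (coins prev nxt : List Int) (alive : List Bool) (S : List Int) : Prop :=
  prev.length = coins.length ∧ nxt.length = coins.length ∧ alive.length = coins.length ∧
  S.Pairwise (· < ·) ∧ (∀ a ∈ S, 0 ≤ a ∧ a < (coins.length : Int)) ∧
  (∀ k : Nat, k < coins.length → alive.getD k false = decide ((k : Int) ∈ S)) ∧
  S.IsChain (pvAdj prev nxt) ∧
  (∀ h : S ≠ [], prev.getD ((S.head h).toNat) 0 = -1 ∧
                 nxt.getD ((S.getLast h).toNat) 0 = (coins.length : Int))

-- one deletion round preserves the invariant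
lemma pvReprStep (coins prev nxt : List Int) (alive : List Bool)
    (prev' nxt' : List Int) (alive' : List Bool) (X M Y : List Int)
    (h : pvRepr coins prev nxt alive (X ++ M ++ Y))
    (hlp : prev'.length = coins.length) (hln : nxt'.length = coins.length)
    (hla : alive'.length = coins.length)
    (ha' : ∀ k : Nat, k < coins.length →
        alive'.getD k false = if (k : Int) ∈ M then false else alive.getD k false)
    (hn' : ∀ k : Nat, k < coins.length →
        nxt'.getD k 0 = if X.getLast? = some (k : Int) then (Y.head?).getD (coins.length : Int)
                        else nxt.getD k 0)
    (hp' : ∀ k : Nat, k < coins.length →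
        prev'.getD k 0 = if Y.head? = some (k : Int) then (X.getLast?).getD (-1)
                         else prev.getD k 0) :
    pvRepr coins prev' nxt' alive' (X ++ Y) := by
  obtain ⟨hpl, hnl, hal, hpw, hrng, halv, hch, hbd⟩ := h
  have hsub : (X ++ Y).Sublist (X ++ M ++ Y) := by
    rw [List.append_assoc]
    exact (List.Sublist.refl X).append (List.sublist_append_right M Y)
  have hnd : (X ++ M ++ Y).Nodup := hpw.imp (fun h => ne_of_lt h)
  rw [List.nodup_append, List.nodup_append] at hnd
  obtain ⟨⟨hndX, hndM, hdXM⟩, hndY, hdXMY⟩ := hnd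
  have hdXY : ∀ a ∈ X, ∀ b ∈ Y, a ≠ b := fun a ha b hb => hdXMY a (by simp [ha]) b hb
  have hdMY : ∀ a ∈ M, ∀ b ∈ Y, a ≠ b := fun a ha b hb => hdXMY a (by simp [ha]) b hb
  have hrngX : ∀ a ∈ X, 0 ≤ a ∧ a < (coins.length : Int) :=
    fun a ha => hrng a (by simp [ha])
  have hrngY : ∀ a ∈ Y, 0 ≤ a ∧ a < (coins.length : Int) :=
    fun a ha => hrng a (by simp [ha])
  have hch' := hch
  rw [List.append_assoc, List.isChain_append, List.isChain_append] at hch'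
  obtain ⟨hchX, ⟨hchM, hchY, hcrossMY⟩, hcrossX⟩ := hch'
  refine ⟨hlp, hln, hla, hpw.sublist hsub, fun a ha => hrng a (hsub.subset ha), ?_, ?_, ?_⟩
  · -- alive entries
    intro k hk
    rw [ha' k hk]
    by_cases hkM : (k : Int) ∈ M
    · rw [if_pos hkM]
      have hnot : (k : Int) ∉ X ++ Y := by
        intro hmem
        rcases List.mem_append.mp hmem with h1 | h1
        · exact hdXM _ h1 _ hkM rfl
        · exact hdMY _ hkM _ h1 rfl
      simp [hnot]
    · rw [if_neg hkM, halv k hk]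
      rw [decide_eq_decide]
      simp only [List.append_assoc, List.mem_append]
      tauto
  · -- the chain
    rw [List.isChain_append]
    refine ⟨?_, ?_, ?_⟩
    · -- within X
      rw [List.isChain_iff_getElem] at hchX ⊢
      intro i hi
      obtain ⟨ha1, ha2⟩ := hchX i hi
      have hm1 : X[i] ∈ X := List.getElem_mem _
      have hm2 : X[i+1] ∈ X := List.getElem_mem _
      have hr1 := hrngX _ hm1
      have hr2 := hrngX _ hm2
      constructor
      · rw [hn' (X[i].toNat) (by omega), Int.toNat_of_nonneg hr1.1, if_neg, ha1]
        intro hc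
        rw [List.getLast?_eq_getElem?, List.getElem?_eq_some_iff] at hc
        obtain ⟨hlt, hc⟩ := hc
        rw [hndX.getElem_inj_iff] at hc
        omega
      · rw [hp' (X[i+1].toNat) (by omega), Int.toNat_of_nonneg hr2.1, if_neg, ha2]
        intro hc
        rw [List.head?_eq_some_iff] at hc
        obtain ⟨ys, hys⟩ := hc
        exact hdXY _ hm2 _ (by simp [hys]) rfl
    · -- within Y
      rw [List.isChain_iff_getElem] at hchY ⊢
      intro i hi
      obtain ⟨ha1, ha2⟩ := hchY i hi
      have hm1 : Y[i] ∈ Y := List.getElem_mem _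
      have hm2 : Y[i+1] ∈ Y := List.getElem_mem _
      have hr1 := hrngY _ hm1
      have hr2 := hrngY _ hm2
      constructor
      · rw [hn' (Y[i].toNat) (by omega), Int.toNat_of_nonneg hr1.1, if_neg, ha1]
        intro hc
        exact hdXY _ (List.mem_of_getLast? hc) _ hm1 rfl
      · rw [hp' (Y[i+1].toNat) (by omega), Int.toNat_of_nonneg hr2.1, if_neg, ha2]
        intro hc
        rw [List.head?_eq_getElem?, List.getElem?_eq_some_iff] at hc
        obtain ⟨hlt0, hc⟩ := hc
        rw [hndY.getElem_inj_iff] at hc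
        omega
    · -- the new cross link
      intro x hx y hy
      rw [Option.mem_def] at hx hy
      have hmx : x ∈ X := List.mem_of_getLast? hx
      have hmy : y ∈ Y := by
        rw [List.head?_eq_some_iff] at hy
        obtain ⟨ys, hys⟩ := hy
        simp [hys]
      have hrx := hrngX _ hmx
      have hry := hrngY _ hmy
      constructor
      · rw [hn' x.toNat (by omega), Int.toNat_of_nonneg hrx.1, if_pos hx, hy]
        rfl
      · rw [hp' y.toNat (by omega), Int.toNat_of_nonneg hry.1, if_pos hy, hx]
        rfl
  · -- the boundary links
    intro hne
    have hSne : X ++ M ++ Y ≠ [] := by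
      intro hc
      rcases List.append_eq_nil_iff.mp hc with ⟨hc1, -⟩
      rcases List.append_eq_nil_iff.mp hc1 with ⟨hc2, -⟩
      apply hne
      rcases List.append_eq_nil_iff.mp hc with ⟨-, hc3⟩
      simp [hc2, hc3]
    obtain ⟨hbd1, hbd2⟩ := hbd hSne
    constructor
    · by_cases hX : X = []
      · subst hX
        have hYne : Y ≠ [] := by simpa using hne
        have hh : (([] : List Int) ++ Y).head hne = Y.head hYne := by simp
        rw [hh]
        have hry := hrngY _ (List.head_mem hYne)
        rw [hp' ((Y.head hYne).toNat) (by omega), Int.toNat_of_nonneg hry.1,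
            if_pos (List.head?_eq_head hYne)]
        simp
      · have hh : (X ++ Y).head hne = X.head hX := List.head_append_left hX
        have hXM : X ++ M ≠ [] := by simp [hX]
        have hh2 : (X ++ M ++ Y).head hSne = X.head hX :=
          (List.head_append_left hXM).trans (List.head_append_left hX)
        rw [hh]
        have hrx := hrngX _ (List.head_mem hX)
        rw [hp' ((X.head hX).toNat) (by omega), Int.toNat_of_nonneg hrx.1, if_neg, ← hh2, hbd1]
        intro hc
        rw [List.head?_eq_some_iff] at hc
        obtain ⟨ys, hys⟩ := hc
        exact hdXY _ (List.head_mem hX) _ (by simp [hys]) rfl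
    · by_cases hY : Y = []
      · subst hY
        have hXne : X ≠ [] := by simpa using hne
        have hh : (X ++ ([] : List Int)).getLast hne = X.getLast hXne := by simp
        rw [hh]
        have hrx := hrngX _ (List.getLast_mem hXne)
        rw [hn' ((X.getLast hXne).toNat) (by omega), Int.toNat_of_nonneg hrx.1,
            if_pos (List.getLast?_eq_getLast hXne)]
        simp
      · have hh : (X ++ Y).getLast hne = Y.getLast hY := List.getLast_append_right hY
        have hh2 : (X ++ M ++ Y).getLast hSne = Y.getLast hY := List.getLast_append_right hY
        rw [hh]
        have hry := hrngY _ (List.getLast_mem hY)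
        rw [hn' ((Y.getLast hY).toNat) (by omega), Int.toNat_of_nonneg hry.1, if_neg, ← hh2, hbd2]
        intro hc
        exact hdXY _ (List.mem_of_getLast? hc) _ (List.getLast_mem hY) rfl

-- evaluation of B's loop body on an alive index
lemma pvBStep_eval (coins : List Int) (n amount : Int) (prev nxt : List Int)
    (alive : List Bool) (r : Int) (ht : PySem.List.pyGetD alive r false = true) :
    pvBStep coins n (amount, prev, nxt, alive) r =
      (let p := PySem.List.pyGetD prev r 0
       let q := PySem.List.pyGetD nxt r 0
       let alive1 := if 0 ≤ p then PySem.List.pySetD alive p false else alive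
       let p2 := if 0 ≤ p then PySem.List.pyGetD prev p 0 else p
       let alive2 := if q < n then PySem.List.pySetD alive1 q false else alive1
       let q2 := if q < n then PySem.List.pyGetD nxt q 0 else q
       (amount + PySem.List.pyGetD coins r 0,
        if q2 < n then PySem.List.pySetD prev q2 p2 else prev,
        if 0 ≤ p2 then PySem.List.pySetD nxt p2 q2 else nxt,
        PySem.List.pySetD alive2 r false)) := by
  by_cases h1 : 0 ≤ PySem.List.pyGetD prev r 0 <;>
    by_cases h2 : PySem.List.pyGetD nxt r 0 < n <;>
      simp [pvBStep, ht, h1, h2]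

-- B's sweep computes pvGreedy on the alive values
lemma pvSim (coins : List Int) :
    ∀ (R prev nxt : List Int) (alive : List Bool) (S : List Int) (amount : Int),
    pvRepr coins prev nxt alive S →
    R.Pairwise (pvLex coins) →
    (∀ a ∈ R, 0 ≤ a ∧ a < (coins.length : Int)) →
    (∀ a ∈ S, a ∈ R) →
    (R.foldl (pvBStep coins (coins.length : Int)) (amount, prev, nxt, alive)).1
      = amount + pvGreedy (S.map (pvKv coins)) := by
  intro R
  induction R with
  | nil =>
    intro prev nxt alive S amount hrepr hsort hrange hmem
    have hS : S = [] := by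
      cases S with
      | nil => rfl
      | cons a t => exact absurd (hmem a (by simp)) (by simp)
    subst hS
    simp [pvGreedy_nil]
  | cons r R ih =>
    intro prev nxt alive S amount hrepr hsort hrange hmem
    obtain ⟨hpl, hnl, hal, hpw, hrngS, halive, hch, hbd⟩ := hrepr
    have hr0 : 0 ≤ r := (hrange r (by simp)).1
    have hrN : r < (coins.length : Int) := (hrange r (by simp)).2
    have hcast : ((r.toNat : Nat) : Int) = r := Int.toNat_of_nonneg hr0
    obtain ⟨hLexHead, hsort'⟩ := List.pairwise_cons.mp hsort
    have hrange' : ∀ a ∈ R, 0 ≤ a ∧ a < (coins.length : Int) :=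
      fun a ha => hrange a (by simp [ha])
    rw [List.foldl_cons]
    by_cases hmemr : r ∈ S
    · -- r is still alive: this is the round in which A picks r
      have htrue : PySem.List.pyGetD alive r false = true := by
        rw [pvGetD_int _ _ _ hr0]
        have h1 := halive r.toNat (by omega)
        rw [hcast] at h1
        rw [h1]
        simp [hmemr]
      obtain ⟨U, V, hS⟩ := List.append_of_mem hmemr
      subst hS
      have hSne : U ++ r :: V ≠ [] := by simp
      have hndS : (U ++ r :: V).Nodup := hpw.imp (fun h => ne_of_lt h)
      have hndS' := hndS
      rw [List.nodup_append] at hndS'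
      obtain ⟨hndU, hndRV, hdU⟩ := hndS'
      rw [List.nodup_cons] at hndRV
      obtain ⟨hrV, hndV⟩ := hndRV
      have hrU : r ∉ U := fun hc => hdU r hc r (by simp) rfl
      have hrngU : ∀ a ∈ U, 0 ≤ a ∧ a < (coins.length : Int) :=
        fun a ha => hrngS a (by simp [ha])
      have hrngV : ∀ a ∈ V, 0 ≤ a ∧ a < (coins.length : Int) :=
        fun a ha => hrngS a (by simp [ha])
      have hch2 := hch
      rw [List.isChain_append, List.isChain_cons] at hch2
      obtain ⟨hchU, ⟨hadjRV, hchV⟩, hcrossUR⟩ := hch2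
      -- the four neighbour values
      have hpval : PySem.List.pyGetD prev r 0 = (U.getLast?).getD (-1) := by
        rw [pvGetD_int _ _ _ hr0]
        rcases List.eq_nil_or_concat U with rfl | ⟨U', u, hU⟩
        · simpa using (hbd hSne).1
        · rw [List.concat_eq_append] at hU
          subst hU
          have hadj := hcrossUR u (by simp) r (by simp)
          rw [hadj.2]
          simp
      have hqval : PySem.List.pyGetD nxt r 0 = (V.head?).getD (coins.length : Int) := by
        rw [pvGetD_int _ _ _ hr0]
        cases V with
        | nil =>
          have hlast : (U ++ r :: ([] : List Int)).getLast hSne = r :=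
            (List.getLast_append_right (l := U) (l' := [r]) (by simp)).trans
              (List.getLast_singleton _)
          have := (hbd hSne).2
          rw [hlast] at this
          simpa using this
        | cons v V' =>
          have hadj := hadjRV v (by simp)
          rw [hadj.1]
          simp
      have hpsign : (0 ≤ (U.getLast?).getD (-1)) ↔ U ≠ [] := by
        rcases List.eq_nil_or_concat U with rfl | ⟨U', u, hU⟩
        · simp
        · rw [List.concat_eq_append] at hU
          subst hU
          have := (hrngU u (by simp)).1
          simp [this]
      have hqsign : ((V.head?).getD (coins.length : Int) < (coins.length : Int)) ↔ V ≠ [] := by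
        cases V with
        | nil => simp
        | cons v V' =>
          have := (hrngV v (by simp)).2
          simp [this]
      -- values after following one more link
      have hp2 : (if 0 ≤ (U.getLast?).getD (-1)
            then PySem.List.pyGetD prev ((U.getLast?).getD (-1)) 0
            else (U.getLast?).getD (-1)) = ((U.dropLast).getLast?).getD (-1) := by
        rcases List.eq_nil_or_concat U with rfl | ⟨U', u, hU⟩
        · simp
        · rw [List.concat_eq_append] at hU
          subst hU
          rw [if_pos (hpsign.mpr (by simp))]
          have hu0 := (hrngU u (by simp)).1
          rw [pvGetD_int _ _ _ (by simpa using hu0)]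
          simp only [List.getLast?_concat, Option.getD_some, List.dropLast_concat]
          rcases List.eq_nil_or_concat U' with rfl | ⟨U'', u', hU'⟩
          · have hh : (([] : List Int) ++ [u] ++ r :: V).head hSne = u := by simp
            have := (hbd hSne).1
            rw [hh] at this
            simpa using this
          · rw [List.concat_eq_append] at hU'
            subst hU'
            rw [List.isChain_append] at hchU
            have hadj := hchU.2.2 u' (by simp) u (by simp)
            rw [hadj.2]
            simp
      have hq2 : (if (V.head?).getD (coins.length : Int) < (coins.length : Int)
            then PySem.List.pyGetD nxt ((V.head?).getD (coins.length : Int)) 0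
            else (V.head?).getD (coins.length : Int)) = ((V.tail).head?).getD (coins.length : Int) := by
        cases V with
        | nil => simp
        | cons v V' =>
          rw [if_pos (hqsign.mpr (by simp))]
          have hv0 := (hrngV v (by simp)).1
          rw [pvGetD_int _ _ _ (by simpa using hv0)]
          simp only [List.head?_cons, Option.getD_some, List.tail_cons]
          cases V' with
          | nil =>
            have hlast : (U ++ r :: [v]).getLast hSne = v := by
              refine (List.getLast_append_right (l := U) (l' := r :: [v]) (by simp)).trans ?_
              rfl
            have := (hbd hSne).2
            rw [hlast] at this
            simpa using this
          | cons v' V'' =>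
            rw [List.isChain_cons] at hchV
            have hadj := hchV.1 v' (by simp)
            rw [hadj.1]
            simp
      -- lengths of the intermediate arrays
      have hA1len : (if 0 ≤ (U.getLast?).getD (-1)
          then PySem.List.pySetD alive ((U.getLast?).getD (-1)) false else alive).length
          = coins.length := by
        split_ifs <;> simp [PySem.List.length_pySetD, hal]
      have hA2len : (if (V.head?).getD (coins.length : Int) < (coins.length : Int)
          then PySem.List.pySetD (if 0 ≤ (U.getLast?).getD (-1)
            then PySem.List.pySetD alive ((U.getLast?).getD (-1)) false else alive)
            ((V.head?).getD (coins.length : Int)) false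
          else (if 0 ≤ (U.getLast?).getD (-1)
            then PySem.List.pySetD alive ((U.getLast?).getD (-1)) false else alive)).length
          = coins.length := by
        split_ifs <;> simp [PySem.List.length_pySetD, hal]
      -- pointwise descriptions of the updated arrays
      have ha1 : ∀ k : Nat, k < coins.length →
          (if 0 ≤ (U.getLast?).getD (-1)
            then PySem.List.pySetD alive ((U.getLast?).getD (-1)) false else alive).getD k false
          = if U.getLast? = some (k : Int) then false else alive.getD k false := by
        intro k hk
        rcases List.eq_nil_or_concat U with rfl | ⟨U', u, hU⟩
        · simp
        · rw [List.concat_eq_append] at hU; subst hU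
          have hu := hrngU u (by simp)
          simp only [List.getLast?_concat, Option.getD_some]
          rw [if_pos hu.1, PySem.List.pySetD_of_nonneg _ _ hu.1,
              pvGetD_set _ _ _ _ _ (by rw [hal]; omega)]
          by_cases hku : u = (k : Int)
          · rw [if_pos (show k = (u).toNat by omega),
                if_pos (show some u = some ((k : Nat) : Int) by rw [hku])]
          · rw [if_neg (show ¬ k = (u).toNat by omega),
                if_neg (show ¬ some u = some ((k : Nat) : Int) by
                  simp only [Option.some.injEq]; exact hku)]
      have ha2 : ∀ k : Nat, k < coins.length →
          (if (V.head?).getD (coins.length : Int) < (coins.length : Int)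
            then PySem.List.pySetD (if 0 ≤ (U.getLast?).getD (-1)
              then PySem.List.pySetD alive ((U.getLast?).getD (-1)) false else alive)
              ((V.head?).getD (coins.length : Int)) false
            else (if 0 ≤ (U.getLast?).getD (-1)
              then PySem.List.pySetD alive ((U.getLast?).getD (-1)) false else alive)).getD k false
          = if V.head? = some (k : Int) then false
            else (if 0 ≤ (U.getLast?).getD (-1)
              then PySem.List.pySetD alive ((U.getLast?).getD (-1)) false else alive).getD k false := by
        intro k hk
        cases V with
        | nil => simp
        | cons v V' =>
          have hv := hrngV v (by simp)
          simp only [List.head?_cons, Option.getD_some]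
          rw [if_pos hv.2, PySem.List.pySetD_of_nonneg _ _ hv.1,
              pvGetD_set _ _ _ _ _ (by rw [hA1len]; omega)]
          by_cases hkv : v = (k : Int)
          · rw [if_pos (show k = (v).toNat by omega),
                if_pos (show some v = some ((k : Nat) : Int) by rw [hkv])]
          · rw [if_neg (show ¬ k = (v).toNat by omega),
                if_neg (show ¬ some v = some ((k : Nat) : Int) by
                  simp only [Option.some.injEq]; exact hkv)]
      have ha' : ∀ k : Nat, k < coins.length →
          (PySem.List.pySetD (if (V.head?).getD (coins.length : Int) < (coins.length : Int)
            then PySem.List.pySetD (if 0 ≤ (U.getLast?).getD (-1)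
              then PySem.List.pySetD alive ((U.getLast?).getD (-1)) false else alive)
              ((V.head?).getD (coins.length : Int)) false
            else (if 0 ≤ (U.getLast?).getD (-1)
              then PySem.List.pySetD alive ((U.getLast?).getD (-1)) false else alive)) r false).getD k false
          = if (k : Int) ∈ U.getLast?.toList ++ r :: V.head?.toList then false
            else alive.getD k false := by
        intro k hk
        rw [PySem.List.pySetD_of_nonneg _ _ hr0,
            pvGetD_set _ _ _ _ _ (by rw [hA2len]; omega), ha2 k hk, ha1 k hk]
        have hc2 : k = r.toNat ↔ (k : Int) = r := by omega
        simp only [List.mem_append, List.mem_cons, Option.mem_toList, Option.mem_def]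
        by_cases c1 : U.getLast? = some (k : Int) <;>
          by_cases c2 : (k : Int) = r <;>
            by_cases c3 : V.head? = some (k : Int) <;>
              simp [c1, c2, c3, hc2]
      have hn' : ∀ k : Nat, k < coins.length →
          (if 0 ≤ ((U.dropLast).getLast?).getD (-1)
            then PySem.List.pySetD nxt (((U.dropLast).getLast?).getD (-1))
                   (((V.tail).head?).getD (coins.length : Int))
            else nxt).getD k 0
          = if (U.dropLast).getLast? = some (k : Int)
            then ((V.tail).head?).getD (coins.length : Int) else nxt.getD k 0 := by
        intro k hk
        rcases List.eq_nil_or_concat U.dropLast with hXnil | ⟨X', x, hX⟩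
        · rw [hXnil]; simp
        · rw [hX]
          simp only [List.concat_eq_append, List.getLast?_concat, Option.getD_some]
          have hxU : x ∈ U := (List.dropLast_sublist U).subset (by rw [hX]; simp)
          have hx := hrngU x hxU
          rw [if_pos hx.1, PySem.List.pySetD_of_nonneg _ _ hx.1,
              pvGetD_set _ _ _ _ _ (by rw [hnl]; omega)]
          by_cases hkx : x = (k : Int)
          · rw [if_pos (show k = (x).toNat by omega),
                if_pos (show some x = some ((k : Nat) : Int) by rw [hkx])]
          · rw [if_neg (show ¬ k = (x).toNat by omega),
                if_neg (show ¬ some x = some ((k : Nat) : Int) by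
                  simp only [Option.some.injEq]; exact hkx)]
      have hp' : ∀ k : Nat, k < coins.length →
          (if ((V.tail).head?).getD (coins.length : Int) < (coins.length : Int)
            then PySem.List.pySetD prev (((V.tail).head?).getD (coins.length : Int))
                   (((U.dropLast).getLast?).getD (-1))
            else prev).getD k 0
          = if (V.tail).head? = some (k : Int)
            then ((U.dropLast).getLast?).getD (-1) else prev.getD k 0 := by
        intro k hk
        rcases hY : V.tail with _ | ⟨y, Y'⟩
        · simp
        · simp only [List.head?_cons, Option.getD_some]
          have hyV : y ∈ V := (List.tail_sublist V).subset (by rw [hY]; simp)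
          have hy := hrngV y hyV
          rw [if_pos hy.2, PySem.List.pySetD_of_nonneg _ _ hy.1,
              pvGetD_set _ _ _ _ _ (by rw [hpl]; omega)]
          by_cases hky : y = (k : Int)
          · rw [if_pos (show k = (y).toNat by omega),
                if_pos (show some y = some ((k : Nat) : Int) by rw [hky])]
          · rw [if_neg (show ¬ k = (y).toNat by omega),
                if_neg (show ¬ some y = some ((k : Nat) : Int) by
                  simp only [Option.some.injEq]; exact hky)]
      -- the invariant after the round
      have hrepr0 : pvRepr coins prev nxt alive
          (U.dropLast ++ (U.getLast?.toList ++ r :: V.head?.toList) ++ V.tail) := by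
        have hSplit : U.dropLast ++ (U.getLast?.toList ++ r :: V.head?.toList) ++ V.tail
            = U ++ r :: V := by
          rcases List.eq_nil_or_concat U with rfl | ⟨U', u, hU⟩ <;>
            cases V <;> simp_all [List.concat_eq_append]
        rw [hSplit]
        exact ⟨hpl, hnl, hal, hpw, hrngS, halive, hch, hbd⟩
      have hrepr' := pvReprStep coins prev nxt alive
        (if ((V.tail).head?).getD (coins.length : Int) < (coins.length : Int)
          then PySem.List.pySetD prev (((V.tail).head?).getD (coins.length : Int))
                 (((U.dropLast).getLast?).getD (-1))
          else prev)
        (if 0 ≤ ((U.dropLast).getLast?).getD (-1)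
          then PySem.List.pySetD nxt (((U.dropLast).getLast?).getD (-1))
                 (((V.tail).head?).getD (coins.length : Int))
          else nxt)
        (PySem.List.pySetD (if (V.head?).getD (coins.length : Int) < (coins.length : Int)
          then PySem.List.pySetD (if 0 ≤ (U.getLast?).getD (-1)
            then PySem.List.pySetD alive ((U.getLast?).getD (-1)) false else alive)
            ((V.head?).getD (coins.length : Int)) false
          else (if 0 ≤ (U.getLast?).getD (-1)
            then PySem.List.pySetD alive ((U.getLast?).getD (-1)) false else alive)) r false)
        (U.dropLast) (U.getLast?.toList ++ r :: V.head?.toList) (V.tail) hrepr0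
        (by split_ifs <;> simp [PySem.List.length_pySetD, hpl])
        (by split_ifs <;> simp [PySem.List.length_pySetD, hnl])
        (by simp [PySem.List.length_pySetD, hA2len])
        ha' hn' hp'
      -- the head of the order is the first maximum of the alive values
      have hub : ∀ a ∈ U ++ r :: V, pvKv coins a ≤ pvKv coins r := by
        intro a ha
        rcases List.mem_cons.mp (hmem a ha) with rfl | haR
        · exact le_refl _
        · have hlex := hLexHead a haR
          unfold pvLex at hlex
          rcases hlex with h | ⟨h1, h2⟩
          · exact le_of_lt h
          · exact le_of_eq h1.symm
      have hlt : ∀ a ∈ U, a < r :=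
        fun a ha => (List.pairwise_append.mp hpw).2.2 a ha r (by simp)
      have hAne : ∀ y ∈ U.map (pvKv coins), y ≠ pvKv coins r := by
        intro y hy
        obtain ⟨a, haU, rfl⟩ := List.mem_map.mp hy
        rcases List.mem_cons.mp (hmem a (by simp [haU])) with rfl | haR
        · exact absurd (hlt a haU) (lt_irrefl _)
        · have hlex := hLexHead a haR
          unfold pvLex at hlex
          rcases hlex with h | ⟨h1, h2⟩
          · exact ne_of_lt h
          · exact absurd h2 (not_lt.mpr (le_of_lt (hlt a haU)))
      have hgr : pvGreedy ((U ++ r :: V).map (pvKv coins))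
          = pvKv coins r + pvGreedy ((U.dropLast ++ V.tail).map (pvKv coins)) := by
        have hstep2 := pvGreedy_step (U.map (pvKv coins)) (V.map (pvKv coins)) (pvKv coins r)
          (by
            intro y hy
            rw [show U.map (pvKv coins) ++ pvKv coins r :: V.map (pvKv coins)
                = (U ++ r :: V).map (pvKv coins) by simp] at hy
            obtain ⟨a, haS, rfl⟩ := List.mem_map.mp hy
            exact hub a haS)
          hAne
        rw [← List.map_dropLast, ← List.map_tail, ← List.map_append] at hstep2
        rw [show (U ++ r :: V).map (pvKv coins)
            = U.map (pvKv coins) ++ pvKv coins r :: V.map (pvKv coins) by simp]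
        exact hstep2
      -- run the loop body and the induction hypothesis
      rw [pvBStep_eval coins (coins.length : Int) amount prev nxt alive r htrue]
      simp only [hpval, hqval, hp2, hq2]
      have hmem' : ∀ a ∈ U.dropLast ++ V.tail, a ∈ R := by
        intro a ha
        have haS : a ∈ U ++ r :: V := by
          rcases List.mem_append.mp ha with h | h
          · exact List.mem_append.mpr (.inl ((List.dropLast_sublist U).subset h))
          · exact List.mem_append.mpr (.inr (List.mem_cons.mpr
              (.inr ((List.tail_sublist V).subset h))))
        rcases List.mem_cons.mp (hmem a haS) with rfl | h
        · exfalso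
          rcases List.mem_append.mp ha with h | h
          · exact hrU ((List.dropLast_sublist U).subset h)
          · exact hrV ((List.tail_sublist V).subset h)
        · exact h
      rw [ih _ _ _ (U.dropLast ++ V.tail) (amount + PySem.List.pyGetD coins r 0)
        hrepr' hsort' hrange' hmem']
      rw [hgr, List.map_append]
      unfold pvKv
      ring
    · -- r was already deleted: the loop skips it
      have hfalse : PySem.List.pyGetD alive r false = false := by
        rw [pvGetD_int _ _ _ hr0]
        have h1 := halive r.toNat (by omega)
        rw [hcast] at h1
        rw [h1]
        simp [hmemr]
      have hstep : pvBStep coins (coins.length : Int) (amount, prev, nxt, alive) r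
          = (amount, prev, nxt, alive) := by
        simp [pvBStep, hfalse]
      rw [hstep]
      exact ih prev nxt alive S amount ⟨hpl, hnl, hal, hpw, hrngS, halive, hch, hbd⟩
        hsort' hrange'
        (fun a ha => (List.mem_cons.mp (hmem a ha)).resolve_left
          (fun hc => hmemr (hc ▸ ha)))

-- the comparator sorted2 uses for B's key
def pvBefore (coins : List Int) (a b : Int) : Bool :=
  decide (-(PySem.List.pyGetD coins a 0) < -(PySem.List.pyGetD coins b 0)) ||
    (!decide (-(PySem.List.pyGetD coins b 0) < -(PySem.List.pyGetD coins a 0)) && decide (a < b))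

lemma pvBefore_lex (coins : List Int) (a b : Int) (h : pvBefore coins a b = true) :
    pvLex coins a b := by
  simp only [pvBefore, Bool.or_eq_true, Bool.and_eq_true, Bool.not_eq_eq_eq_not,
    decide_eq_true_eq, Bool.not_true, decide_eq_false_iff_not] at h
  unfold pvLex pvKv
  omega

lemma pvBefore_total (coins : List Int) (a b : Int) (hne : a ≠ b) :
    pvBefore coins a b = true ∨ pvBefore coins b a = true := by
  simp only [pvBefore, Bool.or_eq_true, Bool.and_eq_true, Bool.not_eq_eq_eq_not,
    decide_eq_true_eq, Bool.not_true, decide_eq_false_iff_not]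
  omega

lemma pvLex_trans (coins : List Int) (a b c : Int)
    (h1 : pvLex coins a b) (h2 : pvLex coins b c) : pvLex coins a c := by
  unfold pvLex pvKv at *
  omega

lemma pvInsert_pw (coins : List Int) (x : Int) (acc : List Int)
    (hx : ∀ y ∈ acc, y ≠ x) (hacc : acc.Pairwise (pvLex coins)) :
    (PySem.List.insertBy (pvBefore coins) x acc).Pairwise (pvLex coins) := by
  induction acc with
  | nil => simp [PySem.List.insertBy]
  | cons y ys ih =>
    rw [List.pairwise_cons] at hacc
    obtain ⟨hy, hys⟩ := hacc
    rw [PySem.List.insertBy]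
    by_cases hb : pvBefore coins x y = true
    · rw [if_pos hb]
      refine List.Pairwise.cons ?_ (List.Pairwise.cons hy hys)
      intro z hz
      rcases List.mem_cons.mp hz with rfl | hz
      · exact pvBefore_lex coins x z hb
      · exact pvLex_trans coins x y z (pvBefore_lex coins x y hb) (hy z hz)
    · rw [if_neg hb]
      refine List.Pairwise.cons ?_ (ih (fun z hz => hx z (by simp [hz])) hys)
      intro z hz
      rw [PySem.List.mem_insertBy] at hz
      rcases hz with rfl | hz
      swap
      · exact hy z hz
      · rcases pvBefore_total coins z y (fun hzy => hx y (by simp) hzy.symm) with h | h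
        · exact absurd h hb
        · exact pvBefore_lex coins y z h

lemma pvFold_pw (coins : List Int) :
    ∀ (xs acc : List Int), xs.Nodup → acc.Pairwise (pvLex coins) →
    (∀ a ∈ xs, a ∉ acc) →
    (xs.foldl (fun acc x => PySem.List.insertBy (pvBefore coins) x acc) acc).Pairwise
      (pvLex coins) := by
  intro xs
  induction xs with
  | nil => intro acc _ h _; simpa using h
  | cons x xs ih =>
    intro acc hnd hacc hdisj
    rw [List.foldl_cons]
    refine ih _ hnd.of_cons (pvInsert_pw coins x acc (fun y hy h => hdisj x (by simp) (h ▸ hy)) hacc) ?_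
    intro a ha hmem
    rw [PySem.List.mem_insertBy] at hmem
    rcases hmem with rfl | hmem
    · rw [List.nodup_cons] at hnd
      exact hnd.1 ha
    · exact hdisj a (by simp [ha]) hmem

lemma pvOrder_sorted (coins : List Int) :
    (PySem.List.sorted2 (PySem.List.pyRange 0 (coins.length : Int) 1)
       (fun j => -(PySem.List.pyGetD coins j 0)) (fun j => j)).Pairwise (pvLex coins) := by
  have h := pvFold_pw coins (PySem.List.pyRange 0 (coins.length : Int) 1) []
    (PySem.List.nodup_pyRange_one 0 (coins.length : Int)) (by simp) (by simp)
  exact h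

-- the initial doubly-linked list represents range(n)
lemma pvReprInit (coins : List Int) :
    pvRepr coins (PySem.List.pyRange (-1) ((coins.length : Int) - 1) 1)
      (PySem.List.pyRange 1 ((coins.length : Int) + 1) 1)
      (List.replicate coins.length true)
      (PySem.List.pyRange 0 (coins.length : Int) 1) := by
  have hlS : (PySem.List.pyRange 0 (coins.length : Int) 1).length = coins.length := by
    rw [PySem.List.length_pyRange_one]; omega
  have hlp : (PySem.List.pyRange (-1) ((coins.length : Int) - 1) 1).length = coins.length := by
    rw [PySem.List.length_pyRange_one]; omega
  have hln : (PySem.List.pyRange 1 ((coins.length : Int) + 1) 1).length = coins.length := by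
    rw [PySem.List.length_pyRange_one]; omega
  have hgp : ∀ k : Nat, k < coins.length →
      (PySem.List.pyRange (-1) ((coins.length : Int) - 1) 1).getD k 0 = -1 + (k : Int) := by
    intro k hk
    rw [List.getD_eq_getElem _ _ (by omega), PySem.List.getElem_pyRange_one]
  have hgn : ∀ k : Nat, k < coins.length →
      (PySem.List.pyRange 1 ((coins.length : Int) + 1) 1).getD k 0 = 1 + (k : Int) := by
    intro k hk
    rw [List.getD_eq_getElem _ _ (by omega), PySem.List.getElem_pyRange_one]
  refine ⟨hlp, hln, by simp, PySem.List.pairwise_lt_pyRange_one 0 (coins.length : Int), ?_, ?_, ?_, ?_⟩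
  · intro a ha; rw [PySem.List.mem_pyRange_one] at ha; exact ha
  · intro k hk
    rw [List.getD_eq_getElem _ _ (by simp [hk]), List.getElem_replicate]
    have hmem : (k : Int) ∈ PySem.List.pyRange 0 (coins.length : Int) 1 := by
      rw [PySem.List.mem_pyRange_one]; omega
    simp [hmem]
  · rw [List.isChain_iff_getElem]
    intro i hi
    rw [hlS] at hi
    rw [PySem.List.getElem_pyRange_one _ _ _ (by omega), PySem.List.getElem_pyRange_one _ _ _ (by omega)]
    have e1 : ((0 : Int) + (i : Int)).toNat = i := by omega
    have e2 : ((0 : Int) + ((i : Nat) + 1 : Nat)).toNat = i + 1 := by omega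
    simp only [pvAdj]
    constructor
    · rw [e1, hgn i (by omega)]
      push_cast
      ring
    · rw [e2, hgp (i+1) (by omega)]
      push_cast
      ring
  · intro hne
    have hN0 : 0 < coins.length := by
      by_contra hc
      apply hne
      apply List.eq_nil_of_length_eq_zero
      rw [hlS]; omega
    constructor
    · have hhead : (PySem.List.pyRange 0 (coins.length : Int) 1).head hne = 0 := by
        have := PySem.List.pyRange_one_cons (a := 0) (b := (coins.length : Int)) (by omega)
        simp [this]
      rw [hhead]
      have e0 : (0 : Int).toNat = 0 := rfl
      rw [e0, hgp 0 (by omega)]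
      simp
    · have hlast : (PySem.List.pyRange 0 (coins.length : Int) 1).getLast hne
          = (coins.length : Int) - 1 := by
        rw [List.getLast_eq_getElem, PySem.List.getElem_pyRange_one _ _ _ (by omega)]
        rw [hlS]
        omega
      rw [hlast]
      have e3 : ((coins.length : Int) - 1).toNat = coins.length - 1 := by omega
      rw [e3, hgn (coins.length - 1) (by omega)]
      omega

-- ===== VERDICT (by name: the statement is the Claim_ definition above) =====
theorem coin_problem_with_heuristic_spec : Claim_equal_coin_problem_with_heuristic := by
  intro coins _
  unfold Spec_coin_problem_with_heuristic
  rw [pvA_eq_greedy]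
  unfold coin_problem_with_heuristic_alt
  rw [PySem.List.len_eq]
  have hsim := pvSim coins
    (PySem.List.sorted2 (PySem.List.pyRange 0 (coins.length : Int) 1)
       (fun j => -(PySem.List.pyGetD coins j 0)) (fun j => j))
    (PySem.List.pyRange (-1) ((coins.length : Int) - 1) 1)
    (PySem.List.pyRange 1 ((coins.length : Int) + 1) 1)
    (List.replicate coins.length true)
    (PySem.List.pyRange 0 (coins.length : Int) 1) 0
    (pvReprInit coins) (pvOrder_sorted coins)
    (fun a ha => by
      have := (PySem.List.sorted2_perm _ _ _ _).mem_iff.mp ha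
      rw [PySem.List.mem_pyRange_one] at this
      exact this)
    (fun a ha => (PySem.List.sorted2_perm _ _ _ _).mem_iff.mpr ha)
  rw [hsim]
  have hmap : (PySem.List.pyRange 0 (coins.length : Int) 1).map (pvKv coins) = coins := by
    simpa [pvKv] using PySem.List.map_pyGetD_pyRange_zero' coins 0
  rw [hmap]
  omega
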